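-- pv_equiv track=rewrite | github.com/shivangsharma08/Codechef-Contests | CZEN2020/ALCHH.py | const
-- ===== SOURCE A (Python) =====
-- def const(let):
--     ar=['B','C','D','F','G','H','J','K','L','M','N','P','Q','R','S','T','V','W', 'X','Y','Z']
--     c=[]
--     for i in range(len(let)):
--         if(let[i] in ar):
--             c.append(let[i])
--     if(len(set(c))>=5):
--         return True
--     else:
--         return False
-- ===== SOURCE B (Python) =====
-- def const(let):
--     ar=['B','C','D','F','G','H','J','K','L','M','N','P','Q','R','S','T','V','W', 'X','Y','Z']
--     count = 0
--     for ch in ar: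
--         if ch in let:
--             count += 1
--     return count >= 5
-- ===== Notes on version B (the rewrite author's own statement) =====
-- stated objective: faster
-- what changed: Instead of scanning the string character by character in Python collecting matched consonants into a list and deduplicating with set(), B iterates over the fixed 21-letter consonant alphabet and counts how many occur in the string via substring membership, returning count >= 5.
import Mathlib
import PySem

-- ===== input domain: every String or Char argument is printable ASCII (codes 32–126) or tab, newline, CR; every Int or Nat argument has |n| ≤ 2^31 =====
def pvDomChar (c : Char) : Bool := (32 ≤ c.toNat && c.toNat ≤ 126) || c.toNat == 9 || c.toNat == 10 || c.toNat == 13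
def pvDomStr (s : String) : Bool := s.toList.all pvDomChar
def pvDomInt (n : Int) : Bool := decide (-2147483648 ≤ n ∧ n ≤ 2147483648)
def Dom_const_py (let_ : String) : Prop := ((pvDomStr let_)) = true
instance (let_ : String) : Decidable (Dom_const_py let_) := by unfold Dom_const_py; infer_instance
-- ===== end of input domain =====

-- B iterates over the fixed 21-consonant alphabet counting which occur in the string,
-- instead of A's scan of the string collecting matches and deduplicating with set().

-- the constant list 'ar' shared by both Pythons
def pvAr : List Char :=
  ['B','C','D','F','G','H','J','K','L','M','N','P','Q','R','S','T','V','W','X','Y','Z']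

-- ===== PORT A =====
-- for i in range(len(let)): if let[i] in ar: c.append(let[i]);  then len(set(c)) >= 5
def const_py (let_ : String) : Bool :=
  let c : List Char :=
    (PySem.List.pyRange 0 (PySem.Str.len let_) 1).foldl
      (fun c i =>
        if PySem.List.pyGetD let_.toList i ' ' ∈ pvAr then
          c ++ [PySem.List.pyGetD let_.toList i ' ']
        else c) []
  if 5 ≤ PySem.Set.len (PySem.Set.ofList c) then true else false

-- ===== PORT B =====
-- for ch in ar: if ch in let: count += 1;  return count >= 5
def const_py_alt (let_ : String) : Bool :=
  let count : Int :=
    pvAr.foldl (fun n ch => if PySem.Str.isIn (String.ofList [ch]) let_ then n + 1 else n) 0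
  decide (5 ≤ count)

-- ===== PRECONDITION & SPEC =====
def Spec_const_py (let_ : String) (out : Bool) : Prop := out = const_py_alt let_
instance (let_ : String) (out : Bool) : Decidable (Spec_const_py let_ out) := by unfold Spec_const_py; infer_instance

-- ===== CLAIM (what is proved, stated in full; the proofs are below) =====
def Claim_equal_const_py : Prop := ∀ (let_ : String), Dom_const_py let_ → Spec_const_py let_ (const_py let_)

-- ===== LEMMAS AND PROOFS =====

-- single-character substring membership is element membership
theorem pv_isIn_singleton (c : Char) (s : String) :
    PySem.Str.isIn (String.ofList [c]) s = (c ∈ s.toList : Bool) := by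
  have hiff : PySem.Str.isIn (String.ofList [c]) s = true ↔ c ∈ s.toList := by
    rw [PySem.Str.isIn_iff_infix]
    constructor
    · intro hinf
      exact hinf.subset (by simp)
    · intro h
      rcases List.mem_iff_append.mp h with ⟨u, v, huv⟩
      exact ⟨u, v, by simp [huv.symm]⟩
  by_cases h : c ∈ s.toList
  · simp only [h, decide_true]
    exact hiff.mpr h
  · simp only [h, decide_false]
    cases hb : PySem.Str.isIn (String.ofList [c]) s
    · rfl
    · exact absurd (hiff.mp hb) h

-- the collecting loop is filter
theorem pv_foldl_filter (p : Char → Prop) [DecidablePred p] (s init : List Char) :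
    s.foldl (fun c ch => if p ch then c ++ [ch] else c) init
      = init ++ s.filter (fun ch => decide (p ch)) := by
  induction s generalizing init with
  | nil => simp
  | cons a t ih =>
    simp only [List.foldl_cons, List.filter_cons]
    by_cases h : p a <;> simp [h, ih]

-- A's deduplicated match list and B's filtered alphabet have the same length
theorem pv_len_eq (s : List Char) :
    (PySem.Set.ofList (s.filter (fun ch => ch ∈ pvAr))).length
      = (pvAr.filter (fun ch => ch ∈ s)).length := by
  apply List.Perm.length_eq
  rw [List.perm_ext_iff_of_nodup (PySem.Set.nodup_ofList _)
        ((by decide : pvAr.Nodup).filter _)]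
  intro a
  simp only [PySem.Set.mem_ofList, List.mem_filter, decide_eq_true_eq]
  tauto

-- ===== VERDICT (by name: the statement is the Claim_ definition above) =====
theorem const_py_spec : Claim_equal_const_py := by
  intro let_ _
  unfold Spec_const_py const_py const_py_alt
  rw [show PySem.Str.len let_ = PySem.List.len let_.toList from by
        simp [PySem.Str.len_eq, PySem.List.len],
      PySem.List.foldl_pyRange_pyGetD (f := fun c ch => if ch ∈ pvAr then c ++ [ch] else c) (d := ' ') (init := ([] : List Char)) (a := 0) (xs := let_.toList) (by norm_num)]
  simp only [Int.toNat_zero, List.drop_zero]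
  simp only [pv_foldl_filter (fun ch => ch ∈ pvAr)]
  have hcount : pvAr.foldl
      (fun n ch => if PySem.Str.isIn (String.ofList [ch]) let_ then n + 1 else n) (0 : Int)
      = ((pvAr.filter (fun ch => ch ∈ let_.toList)).length : Int) := by
    rw [← List.countP_eq_length_filter]
    have : ∀ (l : List Char) (n : Int),
        l.foldl (fun n ch => if PySem.Str.isIn (String.ofList [ch]) let_ then n + 1 else n) n
          = n + (l.countP (fun ch => decide (ch ∈ let_.toList)) : Int) := by
      intro l
      induction l with
      | nil => simp
      | cons c t ih =>
        intro n
        rw [List.foldl_cons]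
        by_cases h : c ∈ let_.toList
        · rw [if_pos (by rw [pv_isIn_singleton]; simp [h]), ih, List.countP_cons]
          simp only [h, decide_true, if_pos]
          push_cast
          ring
        · rw [if_neg (by rw [pv_isIn_singleton]; simp [h]), ih, List.countP_cons]
          simp [h]
    simpa using this pvAr 0
  rw [hcount]
  have hlen := pv_len_eq let_.toList
  simp only [PySem.Set.len, List.nil_append]
  simp only [hlen]
  split_ifs with h
  · simp [h]
  · simp [h]
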